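-- pv_equiv track=rewrite | github.com/JackSimbol/Tractor | judge.py | checkRes
-- ===== SOURCE A (Python) =====
-- from collections import Counter
--
-- cardscale = ['A','2','3','4','5','6','7','8','9','0','J','Q','K']
--
-- suitset = ['h','d','s','c']
--
-- Major = ['jo', 'Jo']
--
-- pointorder = ['3','4','5','6','7','8','9','0','J','Q','K','A','2']
--
-- def num2Poker(num): # num: int-[0,107]
--     # Already a poker
--     if type(num) is str and (num in Major or (num[0] in suitset and num[1] in cardscale)):
--         return num
--     # Locate in 1 single deck
--     NumInDeck = num % 54
--     # joker and Joker:
--     if NumInDeck == 52: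
--         return "jo"
--     if NumInDeck == 53:
--         return "Jo"
--     # Normal cards:
--     pokernumber = cardscale[NumInDeck // 4]
--     pokersuit = suitset[NumInDeck % 4]
--     return pokersuit + pokernumber
--
-- def checkRes(poker, own, level): # poker: list[int]
--     pok = [num2Poker(p) for p in poker]
--     own_pok = [num2Poker(p) for p in own]
--     if pok[0] in Major:
--         major_pok = [pok for pok in own_pok if pok in Major]
--         count = Counter(major_pok)
--         if len(poker) <= 2:
--             for v in count.values():
--                 if v >= len(poker):
--                     return True
--         else: # 拖拉机
--             pos = []
--             for k, v in count.items():
--                 if v == 2: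
--                     if k != 'jo' and k != 'Jo' and k[1] != level: # 大小王和级牌当然不会参与拖拉机
--                         pos.append(pointorder.index(k[1]))
--             if len(pos) >= 2:
--                 pos.sort()
--                 tmp = 0
--                 suc_flag = False
--                 for i in range(len(pos)-1):
--                     if pos[i+1]-pos[i] == 1:
--                         if not suc_flag:
--                             tmp = 2
--                             suc_flag = True
--                         else:
--                             tmp += 1
--                         if tmp >= len(poker)/2:
--                             return True
--                     elif suc_flag:
--                         tmp = 0
--                         suc_flag = False
--     else:
--         suit = pok[0][0]
--         suit_pok = [pok for pok in own_pok if pok[0] == suit and pok[1] != level]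
--         count = Counter(suit_pok)
--         if len(poker) <= 2:
--             for v in count.values():
--                 if v >= len(poker):
--                     return True
--         else:
--             pos = []
--             for k, v in count.items():
--                 if v == 2:
--                     pos.append(pointorder.index(k[1]))
--             if len(pos) >= 2:
--                 pos.sort()
--                 tmp = 0
--                 suc_flag = False
--                 for i in range(len(pos)-1):
--                     if pos[i+1]-pos[i] == 1:
--                         if not suc_flag:
--                             tmp = 2
--                             suc_flag = True
--                         else:
--                             tmp += 1
--                         if tmp >= len(poker)/2:
--                             return True
--                     elif suc_flag:
--                         tmp = 0
--                         suc_flag = False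
--     return False
-- ===== SOURCE B (Python) =====
-- cardscale = ['A','2','3','4','5','6','7','8','9','0','J','Q','K']
-- suitset = ['h','d','s','c']
-- Major = ['jo', 'Jo']
-- pointorder = ['3','4','5','6','7','8','9','0','J','Q','K','A','2']
--
-- def _conv(num):
--     m = num % 54
--     if m == 52:
--         return "jo"
--     if m == 53:
--         return "Jo"
--     return suitset[m % 4] + cardscale[m // 4]
--
-- def checkRes(poker, own, level):
--     lead = _conv(poker[0])
--     own_pok = [_conv(o) for o in own]
--     if lead in Major:
--         rel = [c for c in own_pok if c in Major]
--     else: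
--         rel = [c for c in own_pok if c[0] == lead[0] and c[1] != level]
--     n = len(poker)
--     if n == 1:
--         return len(rel) > 0
--     if n == 2:
--         return any(rel.count(c) >= 2 for c in rel)
--     if lead in Major:
--         # a tractor answer would need non-joker pairs, but only jokers are
--         # relevant to a Major lead here, so none exists
--         return False
--     suit = lead[0]
--     k = (n + 1) // 2  # pairs needed = ceil(n/2)
--     is_pair = [rel.count(suit + r) == 2 for r in pointorder]
--     return any(all(is_pair[s + j] for j in range(k))
--                for s in range(len(pointorder) - k + 1))
-- ===== Notes on version B (the rewrite author's own statement) =====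
-- stated objective: alternative
-- what changed: B drops A's Counter-items pass, sort and stateful flag scan entirely: for the tractor case it builds a 13-entry boolean table is_pair[rank] by direct rel.count per pointorder rank and slides a fixed window of ceil(n/2) consecutive ranks over it; for n<=2 it tests rel directly (non-empty / any element counted twice) instead of looping over Counter values; the vacuous Major-tractor branch returns False outright.
import Mathlib
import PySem

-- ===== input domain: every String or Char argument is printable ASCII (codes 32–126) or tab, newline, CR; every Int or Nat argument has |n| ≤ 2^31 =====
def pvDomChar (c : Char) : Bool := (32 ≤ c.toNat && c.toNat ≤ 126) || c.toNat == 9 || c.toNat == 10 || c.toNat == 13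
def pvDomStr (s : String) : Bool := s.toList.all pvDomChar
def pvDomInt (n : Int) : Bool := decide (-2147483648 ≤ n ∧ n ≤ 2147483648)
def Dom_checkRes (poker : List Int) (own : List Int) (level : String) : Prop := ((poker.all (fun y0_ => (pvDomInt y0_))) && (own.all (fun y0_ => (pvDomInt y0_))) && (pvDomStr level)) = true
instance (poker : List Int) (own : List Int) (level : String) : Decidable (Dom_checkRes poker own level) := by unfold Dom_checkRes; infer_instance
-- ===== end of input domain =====

-- B drops A's Counter-items/sort/flag-scan pipeline: it slides a window of
-- ceil(n/2) consecutive ranks over a 13-entry pair table built by direct counting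
-- (objective: alternative; same asymptotic cost).

-- ===== PORT A =====
-- module constants (shared by both ports, as in the Python module)
def cardscaleL : List Char := ['A','2','3','4','5','6','7','8','9','0','J','Q','K']
def suitsetL : List Char := ['h','d','s','c']
def MajorL : List String := ["jo", "Jo"]
def pointorderL : List Char := ['3','4','5','6','7','8','9','0','J','Q','K','A','2']

-- num2Poker for an int argument (the `type(num) is str` branch is dead under the List Int typing).
-- The cardscale/suitset indices are always in range (0 ≤ d % 54 ≤ 51 here), so `.getD` never fires.
def num2Poker (num : Int) : String :=
  let d := PySem.Int.mod num 54
  if d == 52 then "jo"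
  else if d == 53 then "Jo"
  else
    let pokernumber := (PySem.List.pyGet? cardscaleL (PySem.Int.floordiv d 4)).getD 'A'
    let pokersuit := (PySem.List.pyGet? suitsetL (PySem.Int.mod d 4)).getD 'h'
    String.ofList [pokersuit, pokernumber]

-- s[i] for the 1–2-char card strings produced by num2Poker: always in range, `.getD` never fires.
def charAt (s : String) (i : Int) : Char := (PySem.Str.pyGet? s i).getD ' '

-- pointorder.index(k[1]); the rank char of a card is always in pointorder, so ValueError is impossible.
def posIndex (c : Char) : Int := ((PySem.List.index? pointorderL c).getD 0 : Nat)

-- `for v in count.values(): if v >= len(poker): return True` (falling through to the final return False)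
def valuesLoopA : List Int → Int → Bool
  | [], _ => false
  | v :: rest, n => if n ≤ v then true else valuesLoopA rest n

-- A's flag scan over the sorted pos list; `tmp >= len(poker)/2` is `n ≤ 2*tmp`
-- (exact: float division of an int by 2; the comparison with an int is exact here).
def tractorLoopA (n : Int) : List Int → Int → Bool → Bool
  | a :: b :: rest, tmp, flag =>
    if b - a == 1 then
      let tmp' := if !flag then 2 else tmp + 1
      if n ≤ 2 * tmp' then true
      else tractorLoopA n (b :: rest) tmp' true
    else
      if flag then tractorLoopA n (b :: rest) 0 false
      else tractorLoopA n (b :: rest) tmp flag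
  | _, _, _ => false

def checkRes (poker : List Int) (own : List Int) (level : String) : Bool :=
  let pok := poker.map num2Poker
  let own_pok := own.map num2Poker
  match PySem.List.pyGet? pok 0 with
  | none => false  -- pok[0] raises IndexError in Python; excluded by Pre_checkRes
  | some p0 =>
    let n : Int := poker.length
    if p0 ∈ MajorL then
      let major_pok := own_pok.filter (fun c => decide (c ∈ MajorL))
      let count := PySem.Dict.counter major_pok
      if n ≤ 2 then
        valuesLoopA count.values n
      else
        let pos := count.items.foldl (fun acc kv =>
          if kv.2 == 2 && !(kv.1 == "jo") && !(kv.1 == "Jo")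
              && !(String.ofList [charAt kv.1 1] == level)
          then acc ++ [posIndex (charAt kv.1 1)] else acc) []
        if 2 ≤ pos.length then
          tractorLoopA n (PySem.List.sorted pos (fun x => x) false) 0 false
        else false
    else
      let suit := charAt p0 0
      let suit_pok := own_pok.filter (fun c =>
        charAt c 0 == suit && !(String.ofList [charAt c 1] == level))
      let count := PySem.Dict.counter suit_pok
      if n ≤ 2 then
        valuesLoopA count.values n
      else
        let pos := count.items.foldl (fun acc kv =>
          if kv.2 == 2 then acc ++ [posIndex (charAt kv.1 1)] else acc) []
        if 2 ≤ pos.length then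
          tractorLoopA n (PySem.List.sorted pos (fun x => x) false) 0 false
        else false

-- ===== PORT B =====
def checkRes_alt (poker : List Int) (own : List Int) (level : String) : Bool :=
  match PySem.List.pyGet? (poker.map num2Poker) 0 with
  | none => false  -- poker[0] raises IndexError in Python; excluded by Pre_checkRes
  | some lead =>
    let own_pok := own.map num2Poker
    let rel := if lead ∈ MajorL then own_pok.filter (fun c => decide (c ∈ MajorL))
               else own_pok.filter (fun c =>
                 charAt c 0 == charAt lead 0 && !(String.ofList [charAt c 1] == level))
    let n : Int := poker.length
    if n == 1 then decide (0 < rel.length)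
    else if n == 2 then rel.any (fun c => decide (2 ≤ PySem.List.count rel c))
    else if lead ∈ MajorL then false
    else
      let suit := charAt lead 0
      let k := PySem.Int.floordiv (n + 1) 2
      let isPair := pointorderL.map (fun r =>
        PySem.List.count rel (String.ofList [suit, r]) == 2)
      (PySem.List.pyRange 0 ((pointorderL.length : Int) - k + 1) 1).any (fun s =>
        (PySem.List.pyRange 0 k 1).all (fun j => PySem.List.pyGetD isPair (s + j) false))

-- ===== PRECONDITION & SPEC =====
-- Pre_ excludes only the empty poker list, on which A raises IndexError at pok[0].
def Pre_checkRes (poker : List Int) (own : List Int) (level : String) : Prop := poker ≠ []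
instance (poker : List Int) (own : List Int) (level : String) : Decidable (Pre_checkRes poker own level) := by unfold Pre_checkRes; infer_instance

def pvWitness_checkRes : List Int × List Int × String := ([0, 1, 4, 5], [0, 0, 4, 4], "2")

def Spec_checkRes (poker : List Int) (own : List Int) (level : String) (out : Bool) : Prop := out = checkRes_alt poker own level
instance (poker : List Int) (own : List Int) (level : String) (out : Bool) : Decidable (Spec_checkRes poker own level out) := by unfold Spec_checkRes; infer_instance

-- ===== CLAIM (what is proved, stated in full; the proofs are below) =====
def Claim_equal_checkRes : Prop := ∀ (poker : List Int) (own : List Int) (level : String), Dom_checkRes poker own level → Pre_checkRes poker own level → Spec_checkRes poker own level (checkRes poker own level)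

-- ===== LEMMAS AND PROOFS =====

-- proof-only helper: the longest run of consecutive integers met by a left scan
def bestRun : List Int → Option Int → Int → Int → Int
  | [], _, _, best => best
  | i :: rest, prev, run, best =>
    let run' := if prev == some (i - 1) then run + 1 else 1
    bestRun rest (some i) run' (max best run')

theorem valuesLoopA_eq_any (l : List Int) (n : Int) :
    valuesLoopA l n = l.any (fun v => n ≤ v) := by
  induction l with
  | nil => rfl
  | cons v rest ih =>
    rw [valuesLoopA, List.any_cons, ih]
    by_cases h : n ≤ v
    · simp [h]
    · simp [h]

theorem bestRun_ge (l : List Int) (prev : Option Int) (run best : Int) :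
    best ≤ bestRun l prev run best := by
  induction l generalizing prev run best with
  | nil => simp [bestRun]
  | cons i rest ih =>
    calc best ≤ max best (if prev == some (i - 1) then run + 1 else 1) := le_max_left _ _
    _ ≤ _ := by rw [bestRun]; exact ih _ _ _

-- the core invariant linking A's (tmp, suc_flag) flag scan to the max-run scan
theorem tractor_inv (n : Int) (hn : 3 ≤ n) (rest : List Int) :
    ∀ (b tmp run best : Int) (flag : Bool),
      1 ≤ run → run ≤ best → 2 * best < n →
      (flag = true → tmp = run ∧ 2 ≤ run) → (flag = false → run = 1) →
      tractorLoopA n (b :: rest) tmp flag = decide (n ≤ 2 * bestRun rest (some b) run best) := by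
  induction rest with
  | nil =>
    intro b tmp run best flag _ _ hbest _ _
    have hA : tractorLoopA n [b] tmp flag = false := rfl
    rw [hA, bestRun]
    symm
    rw [decide_eq_false_iff_not]
    omega
  | cons i rest' ih =>
    intro b tmp run best flag hrun hrb hbest hflag hnflag
    by_cases hd : i - b = 1
    · have hb : ((some b : Option Int) == some (i - 1)) = true := by rw [beq_iff_eq, Option.some_inj]; omega
      have htmp' : (if !flag then 2 else tmp + 1) = run + 1 := by
        cases flag with
        | true => have h := hflag rfl; simp only [Bool.not_true, Bool.false_eq_true, if_false]; omega
        | false => have h := hnflag rfl; simp only [Bool.not_false, if_true]; omega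
      rw [tractorLoopA]
      simp only [hd, beq_self_eq_true, if_true, htmp']
      rw [bestRun]
      simp only [hb, if_true]
      by_cases hth : n ≤ 2 * (run + 1)
      · rw [if_pos hth]
        have h1 : run + 1 ≤ max best (run + 1) := le_max_right _ _
        have h2 : max best (run + 1) ≤ bestRun rest' (some i) (run + 1) (max best (run + 1)) :=
          bestRun_ge _ _ _ _
        symm
        rw [decide_eq_true_iff]
        omega
      · rw [if_neg hth]
        exact ih i (run + 1) (run + 1) (max best (run + 1)) true
          (by omega) (le_max_right _ _)
          (by rcases max_choice best (run + 1) with h | h <;> rw [h] <;> omega)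
          (fun _ => ⟨rfl, by omega⟩) (fun h => nomatch h)
    · have hdd : (i - b == 1) = false := by rw [beq_eq_false_iff_ne]; omega
      have hnb : ((some b : Option Int) == some (i - 1)) = false := by rw [beq_eq_false_iff_ne]; simp only [ne_eq, Option.some.injEq]; omega
      rw [tractorLoopA]
      simp only [hdd, Bool.false_eq_true, if_false]
      rw [bestRun]
      simp only [hnb, Bool.false_eq_true, if_false]
      have hbe : max best 1 = best := max_eq_left (by omega)
      rw [hbe]
      cases flag with
      | true =>
        rw [if_pos rfl]
        exact ih i 0 1 best false le_rfl (by omega) hbest (fun h => nomatch h) (fun _ => rfl)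
      | false =>
        rw [if_neg (by simp)]
        exact ih i tmp 1 best false le_rfl (by omega) hbest (fun h => nomatch h) (fun _ => rfl)

-- A's guarded flag scan equals the max-run criterion, on any list, for n ≥ 3
theorem tractor_eq (n : Int) (hn : 3 ≤ n) (l : List Int) :
    (if 2 ≤ l.length then tractorLoopA n l 0 false else false)
      = decide (n ≤ 2 * bestRun l none 0 0) := by
  match l with
  | [] =>
    rw [if_neg (by simp)]
    symm; rw [decide_eq_false_iff_not]
    simp only [bestRun]
    omega
  | [a] =>
    rw [if_neg (by simp)]
    symm; rw [decide_eq_false_iff_not]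
    simp only [bestRun]
    have hnone : ((none : Option Int) == some (a - 1)) = false := rfl
    rw [hnone]
    simp only [Bool.false_eq_true, if_false]
    have : max (0 : Int) 1 = 1 := rfl
    rw [this]
    omega
  | a :: b :: rest =>
    rw [if_pos (by simp)]
    rw [bestRun]
    have hnone : ((none : Option Int) == some (a - 1)) = false := rfl
    rw [hnone]
    simp only [Bool.false_eq_true, if_false]
    have hm : max (0 : Int) 1 = 1 := rfl
    rw [hm]
    exact tractor_inv n hn (b :: rest) a 0 1 1 false le_rfl le_rfl (by omega) (fun h => nomatch h) (fun _ => rfl)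

-- in the Major branch every counter key is "jo" or "Jo", so A's pos list is empty
theorem major_pos_nil (own_pok : List String) (level : String) :
    ((PySem.Dict.counter (own_pok.filter (fun c => decide (c ∈ MajorL)))).items.foldl
      (fun acc kv =>
        if kv.2 == 2 && !(kv.1 == "jo") && !(kv.1 == "Jo")
            && !(String.ofList [charAt kv.1 1] == level)
        then acc ++ [posIndex (charAt kv.1 1)] else acc) []) = ([] : List Int) := by
  rw [PySem.List.foldl_append_if]
  simp only [List.nil_append, List.map_eq_nil_iff, List.filter_eq_nil_iff]
  intro kv hkv
  have hk : kv.1 ∈ (PySem.Dict.counter (own_pok.filter (fun c => decide (c ∈ MajorL)))).keys :=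
    PySem.Dict.mem_keys_of_mem_items _ hkv
  rw [PySem.Dict.keys_counter, PySem.Set.mem_ofList] at hk
  have hmem : kv.1 ∈ MajorL := by
    have h2 := List.of_mem_filter hk
    simpa using h2
  simp only [MajorL, List.mem_cons, List.not_mem_nil, or_false] at hmem
  rcases hmem with h | h <;> simp [h]

-- a window of k consecutive integers all satisfying P
def HasWin (P : Int → Prop) (k : Int) : Prop := ∃ s : Int, ∀ j : Int, s ≤ j → j < s + k → P j

theorem hasWin_of_le_one (P : Int → Prop) (k : Int) (i : Int) (hk : k ≤ 1) (hi : P i) :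
    HasWin P k := by
  refine ⟨i, fun j h1 h2 => ?_⟩
  have : j = i := by omega
  rwa [this]

theorem bestRun_sound (P : Int → Prop) (k : Int) :
    ∀ (l : List Int) (p r b : Int), (∀ x ∈ l, P x) →
      (∀ j, p - r + 1 ≤ j → j ≤ p → P j) → 1 ≤ r →
      (k ≤ b → HasWin P k) → k ≤ bestRun l (some p) r b → HasWin P k := by
  intro l
  induction l with
  | nil =>
    intro p r b _ _ _ hb hk
    exact hb (by simpa [bestRun] using hk)
  | cons i rest ih =>
    intro p r b hmem hint hr hb hk
    rw [bestRun] at hk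
    by_cases hp : ((some p : Option Int) == some (i - 1)) = true
    · have hpe : p = i - 1 := by simpa [beq_iff_eq] using hp
      simp only [hp, if_true] at hk
      refine ih i (r + 1) (max b (r + 1)) (fun x hx => hmem x (List.mem_cons_of_mem _ hx))
        (fun j h1 h2 => ?_) (by omega) (fun hkb => ?_) hk
      · by_cases hji : j = i
        · exact hji ▸ hmem i List.mem_cons_self
        · exact hint j (by omega) (by omega)
      · rcases le_max_iff.mp hkb with h | h
        · exact hb h
        · -- k ≤ r + 1 : take the window ending at i
          refine ⟨i - k + 1, fun j h1 h2 => ?_⟩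
          by_cases hji : j = i
          · exact hji ▸ hmem i List.mem_cons_self
          · exact hint j (by omega) (by omega)
    · have hp' : ((some p : Option Int) == some (i - 1)) = false := by
        simpa using hp
      simp only [hp', Bool.false_eq_true, if_false] at hk
      refine ih i 1 (max b 1) (fun x hx => hmem x (List.mem_cons_of_mem _ hx))
        (fun j h1 h2 => ?_) le_rfl (fun hkb => ?_) hk
      · have : j = i := by omega
        exact this ▸ hmem i List.mem_cons_self
      · rcases le_max_iff.mp hkb with h | h
        · exact hb h
        · exact hasWin_of_le_one P k i h (hmem i List.mem_cons_self)

theorem bestRun_sound_start (P : Int → Prop) (k : Int) (l : List Int)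
    (hmem : ∀ x ∈ l, P x) (hk : k ≤ bestRun l none 0 0) : HasWin P k := by
  cases l with
  | nil =>
    refine ⟨0, fun j h1 h2 => ?_⟩
    simp only [bestRun] at hk
    omega
  | cons i rest =>
    rw [bestRun] at hk
    have hnone : ((none : Option Int) == some (i - 1)) = false := rfl
    rw [hnone] at hk
    simp only [Bool.false_eq_true, if_false] at hk
    have hm : max (0 : Int) 1 = 1 := rfl
    rw [hm] at hk
    exact bestRun_sound P k rest i 1 1 (fun x hx => hmem x (List.mem_cons_of_mem _ hx))
      (fun j h1 h2 => by
        have : j = i := by omega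
        exact this ▸ hmem i List.mem_cons_self)
      le_rfl (fun hkb => hasWin_of_le_one P k i hkb (hmem i List.mem_cons_self)) hk

theorem bestRun_comp2 :
    ∀ (l : List Int) (p r b m : Int), l.Pairwise (· < ·) → (∀ x ∈ l, p < x) →
      (∀ j : Int, 0 ≤ j → j < m → p + 1 + j ∈ l) → r ≤ b →
      r + m ≤ bestRun l (some p) r b := by
  intro l
  induction l with
  | nil =>
    intro p r b m _ _ hwin hrb
    have hm : m ≤ 0 := by
      by_contra h
      exact absurd (hwin 0 le_rfl (by omega)) (List.not_mem_nil)
    simp only [bestRun]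
    omega
  | cons i rest ih =>
    intro p r b m hpw hgt hwin hrb
    by_cases hm : m ≤ 0
    · have := bestRun_ge (i :: rest) (some p) r b
      omega
    · have hip : p + 1 ∈ i :: rest := by
        have := hwin 0 le_rfl (by omega)
        simpa using this
      have hie : i = p + 1 := by
        rcases List.mem_cons.mp hip with he | hmem2
        · omega
        · have h1 : i < p + 1 := (List.pairwise_cons.mp hpw).1 _ hmem2
          have h2 : p < i := hgt i List.mem_cons_self
          omega
      have hps : ((some p : Option Int) == some (i - 1)) = true := by
        rw [beq_iff_eq, Option.some_inj]; omega
      rw [bestRun]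
      simp only [hps, if_true]
      have hrec := ih (p + 1) (r + 1) (max b (r + 1)) (m - 1)
        (List.pairwise_cons.mp hpw).2
        (fun x hx => by
          have := (List.pairwise_cons.mp hpw).1 x hx
          omega)
        (fun j h1 h2 => by
          have hmemw := hwin (j + 1) (by omega) (by omega)
          rcases List.mem_cons.mp hmemw with he | hmemw
          · omega
          · have heq : p + 1 + 1 + j = p + 1 + (j + 1) := by ring
            rwa [heq])
        (le_max_right _ _)
      rw [hie]
      have heq : r + m = r + 1 + (m - 1) := by ring
      rw [heq]
      exact hrec

theorem bestRun_comp :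
    ∀ (l : List Int) (prev : Option Int) (r b s k : Int), l.Pairwise (· < ·) → 0 ≤ r →
      1 ≤ k → (∀ j : Int, 0 ≤ j → j < k → s + j ∈ l) →
      k ≤ bestRun l prev r b := by
  intro l
  induction l with
  | nil =>
    intro prev r b s k _ _ hk hwin
    exact absurd (hwin 0 le_rfl (by omega)) (List.not_mem_nil)
  | cons i rest ih =>
    intro prev r b s k hpw hr hk hwin
    rw [bestRun]
    by_cases his : i = s
    · subst his
      have hrec := bestRun_comp2 rest i
        (if prev == some (i - 1) then r + 1 else 1)
        (max b (if prev == some (i - 1) then r + 1 else 1)) (k - 1)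
        (List.pairwise_cons.mp hpw).2
        (fun x hx => (List.pairwise_cons.mp hpw).1 x hx)
        (fun j h1 h2 => by
          have hmemw := hwin (j + 1) (by omega) (by omega)
          rcases List.mem_cons.mp hmemw with he | hmemw
          · omega
          · have heq : i + 1 + j = i + (j + 1) := by ring
            rwa [heq])
        (le_max_right _ _)
      have hr1 : 1 ≤ (if prev == some (i - 1) then r + 1 else 1) := by
        split <;> omega
      omega
    · refine ih (some i) (if prev == some (i - 1) then r + 1 else 1)
        (max b (if prev == some (i - 1) then r + 1 else 1)) s k
        (List.pairwise_cons.mp hpw).2 (by split <;> omega) hk (fun j h1 h2 => ?_)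
      have hmemw := hwin j h1 h2
      rcases List.mem_cons.mp hmemw with he | hmemw
      · -- s + j = i; then s itself would have to sit below i in the tail
        exfalso
        have hs0 := hwin 0 le_rfl (by omega)
        rcases List.mem_cons.mp hs0 with hs0 | hs0
        · omega
        · have := (List.pairwise_cons.mp hpw).1 _ hs0
          omega
      · exact hmemw

-- card-shape facts, decided over the literal rank/suit lists
def shapeCard (s : String) : Prop :=
  s = "jo" ∨ s = "Jo" ∨ ∃ su ra, s = String.ofList [su, ra] ∧ su ∈ suitsetL ∧ ra ∈ cardscaleL

def num2PokerCore (d : Int) : String :=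
  if d == 52 then "jo"
  else if d == 53 then "Jo"
  else
    let pokernumber := (PySem.List.pyGet? cardscaleL (PySem.Int.floordiv d 4)).getD 'A'
    let pokersuit := (PySem.List.pyGet? suitsetL (PySem.Int.mod d 4)).getD 'h'
    String.ofList [pokersuit, pokernumber]

theorem num2Poker_shape (num : Int) : shapeCard (num2Poker num) := by
  have hcore : num2Poker num = num2PokerCore (PySem.Int.mod num 54) := rfl
  rw [hcore]
  have h0 : 0 ≤ PySem.Int.mod num 54 := PySem.Int.mod_nonneg num (by omega)
  have h1 : PySem.Int.mod num 54 < 54 := PySem.Int.mod_lt num (by omega)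
  unfold shapeCard
  set d := PySem.Int.mod num 54 with hd
  interval_cases d <;>
    first
      | exact Or.inl rfl
      | exact Or.inr (Or.inl rfl)
      | exact Or.inr (Or.inr ⟨_, _, rfl, by decide, by decide⟩)

theorem charAt_mk0 (a b : Char) : charAt (String.ofList [a, b]) 0 = a := by
  simp [charAt, PySem.Str.pyGet?, PySem.Chars.pyGet?, PySem.List.pyGet?, PySem.List.pyIdx?,
    String.toList_ofList]

theorem charAt_mk1 (a b : Char) : charAt (String.ofList [a, b]) 1 = b := by
  simp [charAt, PySem.Str.pyGet?, PySem.Chars.pyGet?, PySem.List.pyGet?, PySem.List.pyIdx?,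
    String.toList_ofList]

theorem posIndex_facts : ∀ c ∈ cardscaleL, 0 ≤ posIndex c ∧ posIndex c < 13 := by
  intro c hc; fin_cases hc <;> decide

theorem pointorder_at_posIndex : ∀ c ∈ cardscaleL,
    PySem.List.pyGetD pointorderL (posIndex c) ' ' = c := by
  intro c hc; fin_cases hc <;> decide

theorem posIndex_at : ∀ x ∈ List.range 13,
    posIndex (pointorderL.getD x ' ') = (x : Int) := by
  intro x hx; fin_cases hx <;> decide

theorem pointorder_mem : ∀ x ∈ List.range 13, pointorderL.getD x ' ' ∈ cardscaleL := by
  intro x hx; fin_cases hx <;> decide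

theorem suit_ne_joker : ∀ su ∈ suitsetL, su ≠ 'j' ∧ su ≠ 'J' := by
  intro c hc; fin_cases hc <;> decide

theorem posIndex_inj : ∀ c1 ∈ cardscaleL, ∀ c2 ∈ cardscaleL,
    posIndex c1 = posIndex c2 → c1 = c2 := by
  intro c1 h1; fin_cases h1 <;> (intro c2 h2; fin_cases h2 <;> decide)

theorem charAt_jo0 : charAt "jo" 0 = 'j' := by decide
theorem charAt_Jo0 : charAt "Jo" 0 = 'J' := by decide

-- the pos list A builds, characterised as a predicate on rank indices, plus Nodup
theorem pos_mem (rel : List String) (suit : Char)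
    (hshape : ∀ c ∈ rel, ∃ ra ∈ cardscaleL, c = String.ofList [suit, ra]) (x : Int) :
    x ∈ (((PySem.Set.ofList rel).filter
          (fun kc => (List.count kc rel : Int) == 2)).map
            (fun kc => posIndex (charAt kc 1)))
      ↔ (0 ≤ x ∧ x < 13 ∧
          List.count (String.ofList [suit, pointorderL.getD x.toNat ' ']) rel = 2) := by
  constructor
  · intro hx
    obtain ⟨kc, hkf, rfl⟩ := List.mem_map.mp hx
    have hkm := List.mem_filter.mp hkf
    have hk_rel : kc ∈ rel := (PySem.Set.mem_ofList rel kc).mp hkm.1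
    obtain ⟨ra, hra, rfl⟩ := hshape kc hk_rel
    have hcnt : List.count (String.ofList [suit, ra]) rel = 2 := by
      have h2 := hkm.2
      rw [beq_iff_eq] at h2
      exact_mod_cast h2
    rw [charAt_mk1]
    obtain ⟨hge, hlt⟩ := posIndex_facts ra hra
    refine ⟨hge, hlt, ?_⟩
    have hp := pointorder_at_posIndex ra hra
    rw [PySem.List.pyGetD_of_nonneg _ _ hge] at hp
    rw [hp]
    exact hcnt
  · rintro ⟨h0, h13, hcnt⟩
    have hxr : x.toNat ∈ List.range 13 := by
      rw [List.mem_range]; omega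
    have hram : pointorderL.getD x.toNat ' ' ∈ cardscaleL := pointorder_mem _ hxr
    have hmem_rel : String.ofList [suit, pointorderL.getD x.toNat ' '] ∈ rel :=
      List.count_pos_iff.mp (by omega)
    refine List.mem_map.mpr ⟨String.ofList [suit, pointorderL.getD x.toNat ' '],
      List.mem_filter.mpr ⟨(PySem.Set.mem_ofList rel _).mpr hmem_rel, by
        rw [beq_iff_eq]; exact_mod_cast hcnt⟩, ?_⟩
    rw [charAt_mk1]
    have hpi := posIndex_at x.toNat hxr
    rw [hpi]
    omega

theorem pos_nodup (rel : List String) (suit : Char)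
    (hshape : ∀ c ∈ rel, ∃ ra ∈ cardscaleL, c = String.ofList [suit, ra]) :
    (((PySem.Set.ofList rel).filter
        (fun kc => (List.count kc rel : Int) == 2)).map
          (fun kc => posIndex (charAt kc 1))).Nodup := by
  refine List.Nodup.map_on ?_ ((PySem.Set.nodup_ofList rel).filter _)
  intro k1 hk1 k2 hk2 heq
  have h1 : k1 ∈ rel := (PySem.Set.mem_ofList rel k1).mp (List.mem_filter.mp hk1).1
  have h2 : k2 ∈ rel := (PySem.Set.mem_ofList rel k2).mp (List.mem_filter.mp hk2).1
  obtain ⟨ra1, hra1, rfl⟩ := hshape k1 h1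
  obtain ⟨ra2, hra2, rfl⟩ := hshape k2 h2
  rw [charAt_mk1, charAt_mk1] at heq
  have := posIndex_inj ra1 hra1 ra2 hra2 heq
  rw [this]

-- B's 13-entry pair table, read at an in-range index
theorem table_at (rel : List String) (suit : Char) (x : Int) (h0 : 0 ≤ x) (h13 : x < 13) :
    (PySem.List.pyGetD (pointorderL.map (fun r =>
        PySem.List.count rel (String.ofList [suit, r]) == 2)) x false = true
      ↔ List.count (String.ofList [suit, pointorderL.getD x.toNat ' ']) rel = 2) := by
  have hlen : x < ((pointorderL.map (fun r =>
      PySem.List.count rel (String.ofList [suit, r]) == 2)).length : Int) := by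
    simp [pointorderL]; omega
  rw [PySem.List.pyGetD_eq_getElem _ _ h0 hlen]
  have hxl : x.toNat < pointorderL.length := by simp [pointorderL]; omega
  rw [List.getElem_map, PySem.List.count_eq, List.getD_eq_getElem _ _ hxl, beq_iff_eq]

-- the tractor branches agree: A's sort-and-flag-scan over pair positions vs
-- B's sliding window over the pair table, for any pos characterised by P
theorem tractor_core (n k : Int) (hn : 3 ≤ n) (hk : PySem.Int.floordiv (n + 1) 2 = k)
    (pos : List Int) (P : Int → Prop)
    (hmem : ∀ x : Int, x ∈ pos ↔ (0 ≤ x ∧ x < 13 ∧ P x))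
    (hnd : pos.Nodup)
    (table : List Bool)
    (htab : ∀ x : Int, 0 ≤ x → x < 13 → (PySem.List.pyGetD table x false = true ↔ P x)) :
    (if 2 ≤ pos.length then
        tractorLoopA n (PySem.List.sorted pos (fun x => x) false) 0 false
      else false)
    = (PySem.List.pyRange 0 (13 - k + 1) 1).any (fun s =>
        (PySem.List.pyRange 0 k 1).all (fun j => PySem.List.pyGetD table (s + j) false)) := by
  have hkk : n ≤ 2 * k ∧ 2 * k ≤ n + 1 := by
    have h := (PySem.Int.floordiv_eq_iff_of_pos (by norm_num)).mp hk
    omega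
  have hk2 : 2 ≤ k := by omega
  have hsp_mem : ∀ x : Int, x ∈ PySem.List.sorted pos (fun x => x) false ↔ x ∈ pos :=
    fun x => PySem.List.mem_sorted pos (fun x => x) false x
  have hsp_nd : (PySem.List.sorted pos (fun x => x) false).Nodup :=
    ((PySem.List.sorted_perm pos (fun x => x) false).nodup_iff).mpr hnd
  have hpw : (PySem.List.sorted pos (fun x => x) false).Pairwise (· < ·) := by
    have h1 := PySem.List.sorted_pairwise pos (fun x => x)
    exact (h1.and hsp_nd).imp (fun {a b} h => lt_of_le_of_ne h.1 h.2)
  rw [← PySem.List.length_sorted pos (fun x => x) false, tractor_eq n hn]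
  apply Bool.eq_iff_iff.mpr
  simp only [decide_eq_true_iff, List.any_eq_true, List.all_eq_true,
    PySem.List.mem_pyRange_one]
  constructor
  · intro h
    have hbr : k ≤ bestRun (PySem.List.sorted pos (fun x => x) false) none 0 0 := by omega
    obtain ⟨s, hwin⟩ := bestRun_sound_start (fun x => 0 ≤ x ∧ x < 13 ∧ P x) k
      (PySem.List.sorted pos (fun x => x) false)
      (fun x hx => (hmem x).mp ((hsp_mem x).mp hx)) hbr
    have h1 := hwin s le_rfl (by omega)
    have h2 := hwin (s + k - 1) (by omega) (by omega)
    refine ⟨s, ⟨h1.1, by omega⟩, fun j hj => ?_⟩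
    have hx := hwin (s + j) (by omega) (by omega)
    exact (htab (s + j) hx.1 hx.2.1).mpr hx.2.2
  · rintro ⟨s, ⟨hs0, hs1⟩, hall⟩
    have hwinSp : ∀ j : Int, 0 ≤ j → j < k → s + j ∈ PySem.List.sorted pos (fun x => x) false := by
      intro j h1 h2
      have hb1 : 0 ≤ s + j := by omega
      have hb2 : s + j < 13 := by omega
      have hP := (htab (s + j) hb1 hb2).mp (hall j ⟨h1, h2⟩)
      exact (hsp_mem _).mpr ((hmem _).mpr ⟨hb1, hb2, hP⟩)
    have := bestRun_comp (PySem.List.sorted pos (fun x => x) false) none 0 0 s k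
      hpw le_rfl (by omega) hwinSp
    omega

-- A's short-answer loop over Counter values, for n = 1 and n = 2
theorem valuesA_one (rel : List String) :
    valuesLoopA (PySem.Dict.counter rel).values 1 = decide (0 < rel.length) := by
  rw [valuesLoopA_eq_any]
  apply Bool.eq_iff_iff.mpr
  simp only [List.any_eq_true, decide_eq_true_iff, PySem.Dict.values,
    PySem.Dict.items_counter, List.map_map, List.mem_map, Function.comp]
  constructor
  · rintro ⟨k, ⟨c, hc, rfl⟩, _⟩
    have : c ∈ rel := (PySem.Set.mem_ofList rel c).mp hc
    exact List.length_pos_of_mem this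
  · intro h
    obtain ⟨c, hc⟩ := List.exists_mem_of_length_pos h
    refine ⟨(List.count c rel : Int), ⟨c, (PySem.Set.mem_ofList rel c).mpr hc, rfl⟩, ?_⟩
    have : 0 < List.count c rel := List.count_pos_iff.mpr hc
    omega

theorem valuesA_two (rel : List String) :
    valuesLoopA (PySem.Dict.counter rel).values 2
      = rel.any (fun c => decide (2 ≤ PySem.List.count rel c)) := by
  rw [valuesLoopA_eq_any]
  apply Bool.eq_iff_iff.mpr
  simp only [List.any_eq_true, decide_eq_true_iff, PySem.Dict.values,
    PySem.Dict.items_counter, List.map_map, List.mem_map, Function.comp,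
    PySem.List.count_eq]
  constructor
  · rintro ⟨k, ⟨c, hc, rfl⟩, hcc⟩
    refine ⟨c, (PySem.Set.mem_ofList rel c).mp hc, ?_⟩
    omega
  · rintro ⟨c, hc, hcc⟩
    refine ⟨(List.count c rel : Int), ⟨c, (PySem.Set.mem_ofList rel c).mpr hc, rfl⟩, ?_⟩
    omega

theorem mem_of_pyGet0 {xs : List String} {y : String}
    (h : PySem.List.pyGet? xs 0 = some y) : y ∈ xs := by
  cases xs with
  | nil => simp [PySem.List.pyGet?, PySem.List.pyIdx?] at h
  | cons a t =>
    simp [PySem.List.pyGet?, PySem.List.pyIdx?] at h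
    simp [h]

-- ===== VERDICT (by name: the statement is the Claim_ definition above) =====
theorem checkRes_spec : Claim_equal_checkRes := by
  intro poker own level _ hpre
  unfold Spec_checkRes checkRes checkRes_alt
  dsimp only
  cases hg : PySem.List.pyGet? (poker.map num2Poker) 0 with
  | none => rfl
  | some p0 =>
    dsimp only
    have hlen1 : 1 ≤ poker.length := List.length_pos_of_ne_nil hpre
    by_cases hmaj : p0 ∈ MajorL
    · -- Major lead
      rw [if_pos hmaj, if_pos hmaj]
      by_cases hm1 : poker.length = 1
      · rw [if_pos (show ((poker.length : Int) ≤ 2) by omega),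
          if_pos (show (((poker.length : Int) == 1) = true) by rw [beq_iff_eq]; exact_mod_cast hm1),
          show ((poker.length : Int)) = 1 by exact_mod_cast hm1, valuesA_one]
      · by_cases hm2 : poker.length = 2
        · rw [if_pos (show ((poker.length : Int) ≤ 2) by omega),
            if_neg (show ¬(((poker.length : Int) == 1) = true) by rw [beq_iff_eq]; omega),
            if_pos (show (((poker.length : Int) == 2) = true) by rw [beq_iff_eq]; exact_mod_cast hm2),
            show ((poker.length : Int)) = 2 by exact_mod_cast hm2, valuesA_two]
        · -- Major lead, n >= 3: A's pos list is empty, B returns False outright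
          rw [if_neg (show ¬(((poker.length : Int)) ≤ 2) by omega),
            if_neg (show ¬(((poker.length : Int) == 1) = true) by rw [beq_iff_eq]; omega),
            if_neg (show ¬(((poker.length : Int) == 2) = true) by rw [beq_iff_eq]; omega),
            if_pos hmaj, major_pos_nil]
          simp
    · -- suited lead
      rw [if_neg hmaj, if_neg hmaj]
      by_cases hm1 : poker.length = 1
      · rw [if_pos (show ((poker.length : Int) ≤ 2) by omega),
          if_pos (show (((poker.length : Int) == 1) = true) by rw [beq_iff_eq]; exact_mod_cast hm1),
          show ((poker.length : Int)) = 1 by exact_mod_cast hm1, valuesA_one]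
      · by_cases hm2 : poker.length = 2
        · rw [if_pos (show ((poker.length : Int) ≤ 2) by omega),
            if_neg (show ¬(((poker.length : Int) == 1) = true) by rw [beq_iff_eq]; omega),
            if_pos (show (((poker.length : Int) == 2) = true) by rw [beq_iff_eq]; exact_mod_cast hm2),
            show ((poker.length : Int)) = 2 by exact_mod_cast hm2, valuesA_two]
        · -- suited lead, n >= 3: the tractor branches
          have hn3 : (3 : Int) ≤ (poker.length : Int) := by
            have h3 : 3 ≤ poker.length := by omega
            exact_mod_cast h3
          rw [if_neg (show ¬(((poker.length : Int)) ≤ 2) by omega),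
            if_neg (show ¬(((poker.length : Int) == 1) = true) by rw [beq_iff_eq]; omega),
            if_neg (show ¬(((poker.length : Int) == 2) = true) by rw [beq_iff_eq]; omega),
            if_neg hmaj]
          -- shape of the lead card
          obtain ⟨q, hq, hqe⟩ := List.mem_map.mp (mem_of_pyGet0 hg)
          have hp0shape : shapeCard p0 := hqe ▸ num2Poker_shape q
          obtain ⟨su, ra0, hp0eq, hsu, hra0⟩ : ∃ su ra, p0 = String.ofList [su, ra] ∧
              su ∈ suitsetL ∧ ra ∈ cardscaleL := by
            rcases hp0shape with h | h | h
            · exact absurd (by simp [MajorL, h]) hmaj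
            · exact absurd (by simp [MajorL, h]) hmaj
            · obtain ⟨su, ra, h1, h2, h3⟩ := h
              exact ⟨su, ra, h1, h2, h3⟩
          have hsuit : charAt p0 0 = su := by rw [hp0eq, charAt_mk0]
          have hshape : ∀ c ∈ (own.map num2Poker).filter (fun c =>
              charAt c 0 == charAt p0 0 && !(String.ofList [charAt c 1] == level)),
              ∃ ra ∈ cardscaleL, c = String.ofList [charAt p0 0, ra] := by
            intro c hc
            obtain ⟨hcOP, hcond⟩ := List.mem_filter.mp hc
            obtain ⟨o, _, rfl⟩ := List.mem_map.mp hcOP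
            simp only [Bool.and_eq_true, beq_iff_eq] at hcond
            have hcond1 := hcond.1
            rcases num2Poker_shape o with h | h | h
            · exfalso
              rw [h, charAt_jo0, hsuit] at hcond1
              exact (suit_ne_joker su hsu).1 hcond1.symm
            · exfalso
              rw [h, charAt_Jo0, hsuit] at hcond1
              exact (suit_ne_joker su hsu).2 hcond1.symm
            · obtain ⟨su2, ra2, hceq, _, hra2⟩ := h
              refine ⟨ra2, hra2, ?_⟩
              rw [hceq, charAt_mk0] at hcond1
              rw [hceq, hcond1]
          rw [PySem.List.foldl_append_if, List.nil_append, PySem.Dict.items_counter,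
            List.filter_map, List.map_map]
          have h13 : ((pointorderL.length : Nat) : Int) = 13 := by simp [pointorderL]
          rw [h13]
          exact tractor_core (poker.length : Int)
            (PySem.Int.floordiv ((poker.length : Int) + 1) 2) hn3 rfl _ _
            (pos_mem _ (charAt p0 0) hshape)
            (pos_nodup _ (charAt p0 0) hshape)
            _
            (table_at _ (charAt p0 0))
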